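-- pv_equiv track=rewrite | github.com/saadnaseem/transfer_hamilton_vantage | transfer.py | assign_dest_plates
-- ===== SOURCE A (Python) =====
-- def assign_dest_plates(wells, wells_per_plate=48):
--     """
--     Assign destination wells to plates.
--
--     This function splits wells across multiple destination plates.
--     For example, if you have 100 wells and wells_per_plate=48:
--     - Wells 1-48 → dest_1
--     - Wells 49-96 → dest_2
--     - Wells 97-100 → dest_3
--
--     Args:
--         wells: List of well IDs
--         wells_per_plate: Number of wells per plate (48 or 96)
--
--     Returns:
--         Dictionary mapping well → plate name (e.g., {'A1': 'dest_1', 'A2': 'dest_1', ...})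
--     """
--     plate_num = 1
--     well_count = 0
--     assignments = {}
--
--     for well in wells:
--         # If we've filled a plate, move to the next one
--         if well_count >= wells_per_plate:
--             plate_num += 1
--             well_count = 0
--
--         dest_plate = f"dest_{plate_num}"  # Create plate name (e.g., 'dest_1', 'dest_2')
--         assignments[well] = dest_plate
--         well_count += 1
--
--     return assignments
-- ===== SOURCE B (Python) =====
-- def assign_dest_plates(wells, wells_per_plate=48):
--     """Single pass: the plate number is computed from the position index,
--     no plate counter / reset branch to maintain."""
--     return {well: f"dest_{i // wells_per_plate + 1}" for i, well in enumerate(wells)}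
-- ===== Notes on version B (the rewrite author's own statement) =====
-- stated objective: idiomatic
-- what changed: Replaces the plate_num/well_count counters and the reset branch with a dict comprehension over enumerate that computes the plate number arithmetically as i // wells_per_plate + 1.
-- outside the precondition, e.g. on assign_dest_plates(['a', 'b'], 0): A returns {'a': 'dest_2', 'b': 'dest_3'}, B raises ZeroDivisionError
import Mathlib
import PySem

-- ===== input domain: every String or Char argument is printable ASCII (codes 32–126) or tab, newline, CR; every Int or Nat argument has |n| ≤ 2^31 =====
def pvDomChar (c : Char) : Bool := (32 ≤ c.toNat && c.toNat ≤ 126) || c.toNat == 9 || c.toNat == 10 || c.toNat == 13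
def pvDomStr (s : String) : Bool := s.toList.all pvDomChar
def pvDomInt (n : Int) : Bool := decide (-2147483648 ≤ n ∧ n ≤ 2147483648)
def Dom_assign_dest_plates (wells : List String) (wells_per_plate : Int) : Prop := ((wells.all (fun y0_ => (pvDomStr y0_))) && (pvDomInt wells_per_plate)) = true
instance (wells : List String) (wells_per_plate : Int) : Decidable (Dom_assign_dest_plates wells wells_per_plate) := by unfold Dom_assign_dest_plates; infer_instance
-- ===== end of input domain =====

-- B replaces A's plate_num/well_count counters and reset branch with a dict comprehension
-- computing the plate number arithmetically from the enumerate index (idiomatic, same cost).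


-- ===== PORT A =====
-- one loop iteration of A: bump plate / reset counter when full, then insert and count
def pvStepA (wells_per_plate : Int) (st : Int × Int × PySem.Dict String String) (well : String) :
    Int × Int × PySem.Dict String String :=
  let pn := if st.2.1 ≥ wells_per_plate then st.1 + 1 else st.1
  let wc := if st.2.1 ≥ wells_per_plate then (0 : Int) else st.2.1
  (pn, wc + 1, st.2.2.insert well ("dest_" ++ PySem.Int.toStr pn))

def assign_dest_plates (wells : List String) (wells_per_plate : Int) : List (String × String) :=
  (wells.foldl (pvStepA wells_per_plate) (1, 0, PySem.Dict.empty)).2.2.items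

-- ===== PORT B =====
def pvStepB (wells_per_plate : Int) (d : PySem.Dict String String) (p : Int × String) :
    PySem.Dict String String :=
  d.insert p.2 ("dest_" ++ PySem.Int.toStr (PySem.Int.floordiv p.1 wells_per_plate + 1))

def assign_dest_plates_alt (wells : List String) (wells_per_plate : Int) : List (String × String) :=
  ((PySem.List.enumerate wells 0).foldl (pvStepB wells_per_plate) PySem.Dict.empty).items

-- ===== PRECONDITION & SPEC =====
-- Pre_ excludes wells_per_plate ≤ 0, a degenerate capacity outside the function's natural
-- domain (the docstring says 48 or 96): there A's ever-growing numbering starting at dest_2 is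
-- leftover loop state, while B raises ZeroDivisionError at 0 and floors to nonpositive plate
-- numbers for negative capacities.
def Pre_assign_dest_plates (wells : List String) (wells_per_plate : Int) : Prop :=
  1 ≤ wells_per_plate
instance (wells : List String) (wells_per_plate : Int) : Decidable (Pre_assign_dest_plates wells wells_per_plate) := by unfold Pre_assign_dest_plates; infer_instance

def pvWitness_assign_dest_plates : List String × Int := (["A1", "A2", "A3"], 2)

def Spec_assign_dest_plates (wells : List String) (wells_per_plate : Int) (out : List (String × String)) : Prop := out = assign_dest_plates_alt wells wells_per_plate
instance (wells : List String) (wells_per_plate : Int) (out : List (String × String)) : Decidable (Spec_assign_dest_plates wells wells_per_plate out) := by unfold Spec_assign_dest_plates; infer_instance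

-- ===== CLAIM (what is proved, stated in full; the proofs are below) =====
def Claim_equal_assign_dest_plates : Prop := ∀ (wells : List String) (wells_per_plate : Int), Dom_assign_dest_plates wells wells_per_plate → Pre_assign_dest_plates wells wells_per_plate → Spec_assign_dest_plates wells wells_per_plate (assign_dest_plates wells wells_per_plate)

-- ===== LEMMAS AND PROOFS =====

-- the counter state after processing index i advances exactly like (i+1) // wpp, (i+1) % wpp
lemma pv_next (wpp i : Int) (hw : 1 ≤ wpp) :
    (if PySem.Int.mod i wpp + 1 ≥ wpp then (PySem.Int.floordiv i wpp + 1 + 1, (0 : Int))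
     else (PySem.Int.floordiv i wpp + 1, PySem.Int.mod i wpp + 1))
      = (PySem.Int.floordiv (i + 1) wpp + 1, PySem.Int.mod (i + 1) wpp) := by
  have h0 : 0 < wpp := by omega
  have hq := PySem.Int.floordiv_mul_add_mod i wpp
  have hr0 := PySem.Int.mod_nonneg i h0
  have hr1 := PySem.Int.mod_lt i h0
  have hq' := PySem.Int.floordiv_mul_add_mod (i + 1) wpp
  have hr0' := PySem.Int.mod_nonneg (i + 1) h0
  have hr1' := PySem.Int.mod_lt (i + 1) h0
  set q := PySem.Int.floordiv i wpp with hqdef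
  set r := PySem.Int.mod i wpp with hrdef
  set q' := PySem.Int.floordiv (i + 1) wpp with hq'def
  set r' := PySem.Int.mod (i + 1) wpp with hr'def
  by_cases h : r + 1 ≥ wpp
  · -- r + 1 = wpp : the plate fills exactly; q' = q + 1, r' = 0
    have hq1 : q' = q + 1 := by
      rw [hq'def, PySem.Int.floordiv_eq_iff_of_pos h0]; constructor <;> nlinarith
    rw [hq1] at hq'
    have hr' : r' = 0 := by nlinarith
    simp [h, hq1, hr']
  · -- still on the same plate: q' = q, r' = r + 1
    have hq1 : q' = q := by
      rw [hq'def, PySem.Int.floordiv_eq_iff_of_pos h0]; constructor <;> nlinarith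
    rw [hq1] at hq'
    have hr' : r' = r + 1 := by nlinarith
    simp [h, hq1, hr']

lemma pv_loop (wpp : Int) (hw : 1 ≤ wpp) :
    ∀ (ws : List String) (i pn wc : Int) (d : PySem.Dict String String), 0 ≤ i →
      (if wc ≥ wpp then (pn + 1, (0 : Int)) else (pn, wc))
        = (PySem.Int.floordiv i wpp + 1, PySem.Int.mod i wpp) →
      (ws.foldl (pvStepA wpp) (pn, wc, d)).2.2
        = (PySem.List.enumerate ws i).foldl (pvStepB wpp) d := by
  intro ws
  induction ws with
  | nil => intro i pn wc d _ _; simp [PySem.List.enumerate_nil]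
  | cons w rest ih =>
    intro i pn wc d hi hst
    have hpn : (if wc ≥ wpp then pn + 1 else pn) = PySem.Int.floordiv i wpp + 1 := by
      by_cases h : wc ≥ wpp <;> simp [h] at hst ⊢ <;> exact hst.1
    have hwc : (if wc ≥ wpp then (0 : Int) else wc) = PySem.Int.mod i wpp := by
      by_cases h : wc ≥ wpp <;> simp [h] at hst ⊢ <;> exact hst.2
    rw [PySem.List.enumerate_cons]
    simp only [List.foldl_cons]
    have hstep : pvStepA wpp (pn, wc, d) w
        = (PySem.Int.floordiv i wpp + 1, PySem.Int.mod i wpp + 1,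
           pvStepB wpp d (i, w)) := by
      simp only [pvStepA, pvStepB, hpn, hwc]
    rw [hstep]
    exact ih (i + 1) _ _ _ (by omega) (by rw [pv_next wpp i hw])

-- ===== VERDICT (by name: the statement is the Claim_ definition above) =====
theorem assign_dest_plates_spec : Claim_equal_assign_dest_plates := by
  intro wells wpp _ hpre
  unfold Pre_assign_dest_plates at hpre
  unfold Spec_assign_dest_plates assign_dest_plates assign_dest_plates_alt
  have h0 : PySem.Int.floordiv 0 wpp = 0 := by
    rw [PySem.Int.floordiv_eq_ediv_of_pos (by exact_mod_cast hpre)]; simp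
  have h1 : PySem.Int.mod 0 wpp = 0 := by
    rw [PySem.Int.mod_eq_emod_of_pos (by exact_mod_cast hpre)]; simp
  rw [pv_loop wpp hpre wells 0 1 0 PySem.Dict.empty (by omega)
      (by rw [h0, h1]; simp [show ¬ ((0 : Int) ≥ wpp) by omega])]
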